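-- pv_equiv track=rewrite | github.com/codeisdemode/cephiq-lite | orchestrator/combined_mcp_server.py | _improve_headers
-- ===== SOURCE A (Python) =====
-- def _improve_headers(content: str) -> str:
--     """Improve header consistency and hierarchy"""
--     lines = content.split('\n')
--     improved_lines = []
--
--     for line in lines:
--         # Ensure consistent header spacing
--         if line.startswith('#'):
--             # Add spacing after headers
--             improved_lines.append(line)
--             if not line.startswith('######'):  # Don't add space after smallest headers
--                 improved_lines.append('')
--         else:
--             improved_lines.append(line)
--
--     return '\n'.join(improved_lines)
-- ===== SOURCE B (Python) =====
-- def _improve_headers(content: str) -> str: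
--     """Single character-level pass: a small state machine tracks the leading
--     '#' run of the current line and emits an extra newline after header lines
--     (1-5 hashes); no line list is built and no split/join is performed."""
--     out = []
--     run = 0        # leading '#' count of the current line, capped at 6
--     in_run = True  # still inside the line's leading-hash prefix
--     for ch in content:
--         if ch == '\n':
--             if 1 <= run <= 5:
--                 out.append('\n')
--             out.append('\n')
--             run = 0
--             in_run = True
--         else:
--             if in_run:
--                 if ch == '#' and run < 6:
--                     run += 1
--                 else:
--                     in_run = False
--             out.append(ch)
--     if 1 <= run <= 5:
--         out.append('\n')
--     return ''.join(out)
-- ===== Notes on version B (the rewrite author's own statement) =====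
-- stated objective: alternative
-- what changed: Replaces A's split/line-list loop/join pipeline with a single character-level pass: a small state machine tracks the leading hash run of the current line and emits the extra newline in-stream, never materialising a list of lines.
import Mathlib
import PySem

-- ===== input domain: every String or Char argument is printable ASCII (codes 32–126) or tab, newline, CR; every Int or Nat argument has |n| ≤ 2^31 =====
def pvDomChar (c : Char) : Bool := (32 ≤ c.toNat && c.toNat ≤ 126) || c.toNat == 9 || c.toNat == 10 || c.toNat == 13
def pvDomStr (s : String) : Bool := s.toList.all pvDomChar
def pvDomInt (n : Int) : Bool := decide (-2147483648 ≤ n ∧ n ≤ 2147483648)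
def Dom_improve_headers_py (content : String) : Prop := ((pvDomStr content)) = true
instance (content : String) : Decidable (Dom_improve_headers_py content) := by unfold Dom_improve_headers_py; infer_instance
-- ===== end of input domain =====

-- B replaces A's split/loop/join over a line list by a single character-level
-- state machine over the string (alternative decomposition, same O(n) cost).

-- ===== PORT A =====
-- A: split on '\n', loop appending each line (plus '' after 1-5-hash header lines), join with '\n'.
def improve_headers_py (content : String) : String :=
  let lines : List String := (PySem.Str.split? content "\n").getD []  -- sep "\n" ≠ "": always `some`
  let improved_lines : List String :=
    lines.foldl (fun acc line =>
      if PySem.Str.startswith line "#" then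
        let acc := acc ++ [line]
        if !PySem.Str.startswith line "######" then acc ++ [""] else acc
      else acc ++ [line]) []
  PySem.Str.join "\n" improved_lines

-- ===== PORT B =====
-- state: (out chars so far, leading-'#' run of current line capped at 6, still-in-prefix flag)
def pvStepB (st : List Char × Nat × Bool) (ch : Char) : List Char × Nat × Bool :=
  if ch = '\n' then
    ((if 1 ≤ st.2.1 ∧ st.2.1 ≤ 5 then st.1 ++ ['\n'] else st.1) ++ ['\n'], 0, true)
  else
    let rb : Nat × Bool :=
      if st.2.2 then
        (if ch = '#' ∧ st.2.1 < 6 then (st.2.1 + 1, true) else (st.2.1, false))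
      else (st.2.1, st.2.2)
    (st.1 ++ [ch], rb)

def improve_headers_py_alt (content : String) : String :=
  let st := content.toList.foldl pvStepB ([], 0, true)
  String.ofList (if 1 ≤ st.2.1 ∧ st.2.1 ≤ 5 then st.1 ++ ['\n'] else st.1)

-- ===== PRECONDITION & SPEC =====
def Spec_improve_headers_py (content : String) (out : String) : Prop := out = improve_headers_py_alt content
instance (content : String) (out : String) : Decidable (Spec_improve_headers_py content out) := by unfold Spec_improve_headers_py; infer_instance

-- ===== CLAIM (what is proved, stated in full; the proofs are below) =====
def Claim_equal_improve_headers_py : Prop := ∀ (content : String), Dom_improve_headers_py content → Spec_improve_headers_py content (improve_headers_py content)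

-- ===== LEMMAS AND PROOFS =====

-- lines of a char list, split at '\n' (the shape of Python's str.split('\n'))
def pvLines : List Char → List (List Char)
  | [] => [[]]
  | c :: r =>
    if c = '\n' then [] :: pvLines r
    else match pvLines r with
      | [] => [[c]]
      | h :: t => (c :: h) :: t

-- A's per-line expansion, at the char-list level
def pvExpand (l : List Char) : List (List Char) :=
  if PySem.Chars.startswith l ['#'] then
    if !PySem.Chars.startswith l ['#','#','#','#','#','#'] then [l, []] else [l]
  else [l]

def pvAOut (cs : List Char) : List Char :=
  PySem.Chars.join ['\n'] ((pvLines cs).flatMap pvExpand)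

def pvBOut (cs : List Char) : List Char :=
  let st := cs.foldl pvStepB ([], 0, true)
  if 1 ≤ st.2.1 ∧ st.2.1 ≤ 5 then st.1 ++ ['\n'] else st.1

-- number of leading '#' of a line
def pvLead : List Char → Nat
  | [] => 0
  | c :: r => if c = '#' then pvLead r + 1 else 0

-- the (run, in_run) component of B's scan of a line
def pvRunAux : Nat → Bool → List Char → Nat × Bool
  | run, in_run, [] => (run, in_run)
  | run, true, c :: r => if c = '#' ∧ run < 6 then pvRunAux (run + 1) true r else pvRunAux run false r
  | run, false, _ :: r => pvRunAux run false r

lemma pvLines_ne_nil (cs : List Char) : pvLines cs ≠ [] := by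
  cases cs with
  | nil => simp [pvLines]
  | cons c r =>
    simp only [pvLines]
    split
    · simp
    · split <;> simp

lemma pvLines_no_nl (cs : List Char) (h : '\n' ∉ cs) : pvLines cs = [cs] := by
  induction cs with
  | nil => rfl
  | cons c r ih =>
    have hc : c ≠ '\n' := by intro hh; exact h (hh ▸ List.mem_cons_self)
    have hr : '\n' ∉ r := fun hm => h (List.mem_cons_of_mem _ hm)
    simp only [pvLines, if_neg hc, ih hr]

lemma pvLines_append (l rest : List Char) (h : '\n' ∉ l) :
    pvLines (l ++ '\n' :: rest) = l :: pvLines rest := by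
  induction l with
  | nil => simp [pvLines]
  | cons c r ih =>
    have hc : c ≠ '\n' := by intro hh; exact h (hh ▸ List.mem_cons_self)
    have hr : '\n' ∉ r := fun hm => h (List.mem_cons_of_mem _ hm)
    simp only [List.cons_append, pvLines, if_neg hc, ih hr]

lemma pvSplitOn_go (sep : List Char) (hsep : sep = ['\n']) :
    ∀ fuel l cur acc, l.length < fuel →
      PySem.Chars.splitOn.go sep fuel l cur acc =
        acc.reverse ++ (match pvLines l with
          | [] => [cur.reverse]
          | h :: t => (cur.reverse ++ h) :: t) := by
  subst hsep
  intro fuel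
  induction fuel with
  | zero => intro l cur acc h; omega
  | succ f ih =>
    intro l cur acc h
    cases l with
    | nil => simp [PySem.Chars.splitOn.go, pvLines]
    | cons c rest =>
      by_cases hc : c = '\n'
      · subst hc
        have hpre : List.isPrefixOf ['\n'] ('\n' :: rest) = true := by
          simp [List.isPrefixOf]
        have hrec := ih rest [] (List.reverse cur :: acc) (by simpa using Nat.lt_of_succ_lt_succ h)
        have hne := pvLines_ne_nil rest
        cases hlr : pvLines rest with
        | nil => exact absurd hlr hne
        | cons h2 t2 =>
          rw [PySem.Chars.splitOn.go]
          simp only [hpre, if_true, hlr] at hrec ⊢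
          simp [hrec, pvLines, hlr]
      · rw [PySem.Chars.splitOn.go]
        have hpre : List.isPrefixOf ['\n'] (c :: rest) = false := by
          simp [List.isPrefixOf]; intro hh; exact absurd hh.symm hc
        simp only [hpre]
        rw [if_neg (by simp)]
        rw [ih rest (c :: cur) acc (by simpa using Nat.lt_of_succ_lt_succ h)]
        have hne := pvLines_ne_nil rest
        cases hlr : pvLines rest with
        | nil => exact absurd hlr hne
        | cons h2 t2 => simp [pvLines, hlr, if_neg hc]

lemma pvSplitOn_eq_pvLines (cs : List Char) :
    PySem.Chars.splitOn cs ['\n'] = pvLines cs := by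
  unfold PySem.Chars.splitOn
  rw [pvSplitOn_go ['\n'] rfl (cs.length + 1) cs [] [] (by omega)]
  have hne := pvLines_ne_nil cs
  cases hlr : pvLines cs with
  | nil => exact absurd hlr hne
  | cons h t => simp

-- B's step never fires the newline branch on a line char, so a whole line just appends
lemma pvFoldl_line (l : List Char) (h : '\n' ∉ l) :
    ∀ out run in_run, l.foldl pvStepB (out, run, in_run) =
      (out ++ l, pvRunAux run in_run l) := by
  induction l with
  | nil => intro out run in_run; simp [pvRunAux]
  | cons c r ih =>
    intro out run in_run
    have hc : c ≠ '\n' := by intro hh; exact h (hh ▸ List.mem_cons_self)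
    have hr : '\n' ∉ r := fun hm => h (List.mem_cons_of_mem _ hm)
    cases in_run with
    | true =>
      by_cases hh : c = '#' ∧ run < 6
      · simp [pvStepB, hh, ih hr, pvRunAux]
      · simp [pvStepB, if_neg hc, hh, ih hr, pvRunAux]
    | false => simp [pvStepB, if_neg hc, ih hr, pvRunAux]

lemma pvRunAux_false (l : List Char) : ∀ run, pvRunAux run false l = (run, false) := by
  induction l with
  | nil => intro run; rfl
  | cons c r ih => intro run; simp [pvRunAux, ih]

lemma pvRunAux_run (l : List Char) : ∀ run, run ≤ 6 →
    (pvRunAux run true l).1 = min (run + pvLead l) 6 := by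
  induction l with
  | nil => intro run h; simp [pvRunAux, pvLead]; omega
  | cons c r ih =>
    intro run h
    by_cases hc : c = '#'
    · by_cases hr : run < 6
      · have : pvRunAux run true (c :: r) = pvRunAux (run + 1) true r := by
          simp only [pvRunAux]; rw [if_pos (And.intro hc hr)]
        rw [this, ih (run + 1) (by omega)]
        simp [pvLead, hc]; omega
      · simp only [pvRunAux, if_neg (by omega : ¬ (c = '#' ∧ run < 6)), pvRunAux_false]
        simp [pvLead, hc]; omega
    · simp only [pvRunAux, if_neg (by simp [hc] : ¬ (c = '#' ∧ run < 6)), pvRunAux_false]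
      simp [pvLead, hc]; omega

lemma pvStartswith_lead (l : List Char) (k : Nat) :
    PySem.Chars.startswith l (List.replicate k '#') = true ↔ k ≤ pvLead l := by
  rw [PySem.Chars.startswith_iff]
  induction k generalizing l with
  | zero => simp
  | succ k ih =>
    cases l with
    | nil => simp [List.replicate_succ, pvLead]
    | cons c r =>
      simp only [List.replicate_succ, List.cons_prefix_cons, pvLead]
      constructor
      · rintro ⟨rfl, hp⟩
        rw [if_pos rfl]
        exact Nat.succ_le_succ ((ih r).mp hp)
      · intro hk
        by_cases hc : c = '#'
        · subst hc
          rw [if_pos rfl] at hk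
          exact ⟨rfl, (ih r).mpr (Nat.le_of_succ_le_succ hk)⟩
        · simp [hc] at hk
      
-- B's out-component is a running prefix: a common prefix factors out
lemma pvStepB_shift (out' : List Char) (st : List Char × Nat × Bool) (c : Char) :
    pvStepB (out' ++ st.1, st.2) c = (out' ++ (pvStepB st c).1, (pvStepB st c).2) := by
  unfold pvStepB
  by_cases hc : c = '\n'
  · simp only [if_pos hc]
    split <;> simp
  · simp [if_neg hc]

lemma pvFoldl_shift (cs : List Char) :
    ∀ (st : List Char × Nat × Bool) (out' : List Char),
      cs.foldl pvStepB (out' ++ st.1, st.2) =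
        (out' ++ (cs.foldl pvStepB st).1, (cs.foldl pvStepB st).2) := by
  induction cs with
  | nil => intro st out'; rfl
  | cons c r ih =>
    intro st out'
    simp only [List.foldl_cons, pvStepB_shift out' st c]
    exact ih (pvStepB st c) out'

lemma pvSplitFirst (cs : List Char) (h : '\n' ∈ cs) :
    ∃ l rest, '\n' ∉ l ∧ cs = l ++ '\n' :: rest := by
  induction cs with
  | nil => cases h
  | cons c r ih =>
    by_cases hc : c = '\n'
    · exact ⟨[], r, by simp, by simp [hc]⟩
    · have hr : '\n' ∈ r := by
        rcases List.mem_cons.mp h with h1 | h1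
        · exact absurd h1.symm hc
        · exact h1
      obtain ⟨l, rest, hnl, heq⟩ := ih hr
      exact ⟨c :: l, rest, by
        intro hm
        rcases List.mem_cons.mp hm with h1 | h1
        · exact hc h1.symm
        · exact hnl h1, by simp [heq]⟩

lemma pvExpand_ne_nil (l : List Char) : pvExpand l ≠ [] := by
  unfold pvExpand; split <;> [skip; simp]; split <;> simp

lemma pvFlatMap_ne_nil (L : List (List Char)) (h : L ≠ []) :
    L.flatMap pvExpand ≠ [] := by
  cases L with
  | nil => exact absurd rfl h
  | cons a t =>
    simp only [List.flatMap_cons]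
    intro hh
    rcases List.append_eq_nil_iff.mp hh with ⟨h1, _⟩
    exact pvExpand_ne_nil a h1

lemma pvJoin_cons (a : List Char) (L : List (List Char)) (h : L ≠ []) :
    PySem.Chars.join ['\n'] (a :: L) = a ++ '\n' :: PySem.Chars.join ['\n'] L := by
  cases L with
  | nil => exact absurd rfl h
  | cons b t => rw [PySem.Chars.join_cons_cons]; simp

-- the single-line case: B's header test agrees with A's startswith pair
lemma pvLine_case (l : List Char) (h : '\n' ∉ l) :
    pvBOut l = PySem.Chars.join ['\n'] (pvExpand l) := by
  unfold pvBOut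
  rw [pvFoldl_line l h [] 0 true]
  have hrun : (pvRunAux 0 true l).1 = min (pvLead l) 6 := by
    simpa using pvRunAux_run l 0 (by omega)
  have h1 : PySem.Chars.startswith l ['#'] = true ↔ 1 ≤ pvLead l := by
    simpa using pvStartswith_lead l 1
  have h6 : PySem.Chars.startswith l ['#','#','#','#','#','#'] = true ↔ 6 ≤ pvLead l := by
    simpa using pvStartswith_lead l 6
  unfold pvExpand
  by_cases hhdr : 1 ≤ pvLead l ∧ pvLead l < 6
  · have hs1 : PySem.Chars.startswith l ['#'] = true := h1.mpr hhdr.1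
    have hs6 : PySem.Chars.startswith l ['#','#','#','#','#','#'] = false := by
      rcases Bool.eq_false_or_eq_true (PySem.Chars.startswith l ['#','#','#','#','#','#']) with hh | hh
      · exact absurd (h6.mp hh) (by omega)
      · exact hh
    rw [if_pos (by rw [hrun]; omega)]
    simp [hs1, hs6, PySem.Chars.join_cons_cons, PySem.Chars.join_singleton]
  · rw [if_neg (by rw [hrun]; omega)]
    rcases Bool.eq_false_or_eq_true (PySem.Chars.startswith l ['#']) with hs1 | hs1
    · have h6' : PySem.Chars.startswith l ['#','#','#','#','#','#'] = true :=
        h6.mpr (by have := h1.mp hs1; omega)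
      simp [hs1, h6', PySem.Chars.join_singleton]
    · simp [hs1, PySem.Chars.join_singleton]

-- join distributes over A's per-line expansion followed by more lines
lemma pvJoin_expand (l : List Char) (M : List (List Char)) (hM : M ≠ []) :
    PySem.Chars.join ['\n'] (pvExpand l ++ M) =
      PySem.Chars.join ['\n'] (pvExpand l) ++ '\n' :: PySem.Chars.join ['\n'] M := by
  unfold pvExpand
  split
  · split
    · rw [List.cons_append, List.cons_append, List.nil_append,
        pvJoin_cons l ([] :: M) (by simp), pvJoin_cons [] M hM,
        PySem.Chars.join_cons_cons, PySem.Chars.join_singleton]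
      simp
    · rw [List.cons_append, List.nil_append, pvJoin_cons l M hM, PySem.Chars.join_singleton]
  · rw [List.cons_append, List.nil_append, pvJoin_cons l M hM, PySem.Chars.join_singleton]

-- B's scan splits at the first newline
lemma pvBOut_append (l rest : List Char) (h : '\n' ∉ l) :
    pvBOut (l ++ '\n' :: rest) = pvBOut l ++ '\n' :: pvBOut rest := by
  unfold pvBOut
  rw [List.foldl_append, pvFoldl_line l h [] 0 true, List.foldl_cons]
  have hstep : pvStepB (([] : List Char) ++ l, pvRunAux 0 true l) '\n' =
      (((if 1 ≤ (pvRunAux 0 true l).1 ∧ (pvRunAux 0 true l).1 ≤ 5 then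
          (([] : List Char) ++ l) ++ ['\n'] else ([] : List Char) ++ l) ++ ['\n'] : List Char), 0, true) := by
    simp [pvStepB]
  rw [hstep]
  have hshift := pvFoldl_shift rest (([] : List Char), 0, true)
    ((if 1 ≤ (pvRunAux 0 true l).1 ∧ (pvRunAux 0 true l).1 ≤ 5 then
        (([] : List Char) ++ l) ++ ['\n'] else ([] : List Char) ++ l) ++ ['\n'])
  simp only [List.append_nil] at hshift
  rw [hshift]
  by_cases h2 : 1 ≤ (List.foldl pvStepB ([], 0, true) rest).2.1 ∧ (List.foldl pvStepB ([], 0, true) rest).2.1 ≤ 5 <;>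
    by_cases h1 : 1 ≤ (pvRunAux 0 true l).1 ∧ (pvRunAux 0 true l).1 ≤ 5 <;>
      simp [h1, h2]

-- main equivalence at the char-list level
lemma pvMain (n : Nat) : ∀ cs : List Char, cs.length ≤ n → pvBOut cs = pvAOut cs := by
  induction n with
  | zero =>
    intro cs h
    have : cs = [] := List.eq_nil_of_length_eq_zero (Nat.le_zero.mp h)
    subst this
    decide
  | succ n ih =>
    intro cs hlen
    by_cases hmem : '\n' ∈ cs
    · obtain ⟨l, rest, hnl, rfl⟩ := pvSplitFirst cs hmem
      have hrest : rest.length ≤ n := by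
        simp only [List.length_append, List.length_cons] at hlen; omega
      unfold pvAOut
      rw [pvLines_append l rest hnl]
      simp only [List.flatMap_cons]
      rw [pvJoin_expand l _ (pvFlatMap_ne_nil _ (pvLines_ne_nil rest))]
      have ihr := ih rest hrest
      unfold pvAOut at ihr
      rw [← ihr, ← pvLine_case l hnl]
      exact pvBOut_append l rest hnl
    · unfold pvAOut
      rw [pvLines_no_nl cs hmem]
      simp only [List.flatMap_cons, List.flatMap_nil, List.append_nil]
      exact pvLine_case cs hmem

-- A's foldl accumulates by appending a per-line block
lemma pvFoldl_expand (ls : List String) : ∀ acc : List String,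
    ls.foldl (fun acc line =>
      if PySem.Str.startswith line "#" then
        let acc := acc ++ [line]
        if !PySem.Str.startswith line "######" then acc ++ [""] else acc
      else acc ++ [line]) acc
    = acc ++ ls.flatMap (fun line =>
        if PySem.Str.startswith line "#" then
          if !PySem.Str.startswith line "######" then [line, ""] else [line]
        else [line]) := by
  induction ls with
  | nil => intro acc; simp
  | cons a t ih =>
    intro acc
    rw [List.foldl_cons, ih, List.flatMap_cons]
    split_ifs <;> simp_all

lemma pvFlatMap_map (L : List (List Char)) :
    (L.map String.ofList).flatMap (fun line =>
        if PySem.Str.startswith line "#" then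
          if !PySem.Str.startswith line "######" then [line, ""] else [line]
        else [line])
      = (L.flatMap pvExpand).map String.ofList := by
  induction L with
  | nil => rfl
  | cons a t ih =>
    simp only [List.map_cons, List.flatMap_cons, List.map_append, ih]
    congr 1
    unfold pvExpand
    have h1 : PySem.Str.startswith (String.ofList a) "#" = PySem.Chars.startswith a ['#'] := by
      simp [PySem.Str.startswith, String.toList_ofList]
    have h6 : PySem.Str.startswith (String.ofList a) "######" =
        PySem.Chars.startswith a ['#','#','#','#','#','#'] := by
      simp [PySem.Str.startswith, String.toList_ofList]
    rw [h1, h6]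
    have h0 : String.ofList ([] : List Char) = "" := rfl
    split_ifs <;> simp [h0]

lemma pvJoin_map (X : List (List Char)) :
    PySem.Str.join "\n" (X.map String.ofList) = String.ofList (PySem.Chars.join ['\n'] X) := by
  simp [PySem.Str.join, List.map_map, Function.comp_def, String.toList_ofList]

lemma pvA_eq (content : String) :
    improve_headers_py content = String.ofList (pvAOut content.toList) := by
  unfold improve_headers_py pvAOut
  have hsplit : PySem.Str.split? content "\n" =
      some ((PySem.Chars.splitOn content.toList ['\n']).map String.ofList) := by
    simp [PySem.Str.split?, PySem.Chars.split?]
  rw [hsplit]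
  simp only [Option.getD_some]
  rw [pvFoldl_expand, pvFlatMap_map, pvSplitOn_eq_pvLines]
  simp [pvJoin_map]

lemma pvB_eq (content : String) :
    improve_headers_py_alt content = String.ofList (pvBOut content.toList) := by
  rfl

-- ===== VERDICT (by name: the statement is the Claim_ definition above) =====
theorem improve_headers_py_spec : Claim_equal_improve_headers_py := by
  intro content _
  unfold Spec_improve_headers_py
  rw [pvA_eq, pvB_eq, pvMain content.toList.length content.toList le_rfl]
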